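-- pv_equiv track=rewrite | github.com/padrinosardo/TheNovelist | ui/views/project_info_detail_view.py | _suggest_tone_for_genre
-- ===== SOURCE A (Python) =====
-- def _suggest_tone_for_genre(genre: str) -> list:
--     """Suggest narrative tone based on genre"""
--     genre = genre.lower()
--
--     if any(word in genre for word in ['thriller', 'noir', 'mystery']):
--         return ["dark", "tense", "suspenseful"]
--     elif any(word in genre for word in ['fantasy', 'epic']):
--         return ["epic", "adventurous", "mystical"]
--     elif any(word in genre for word in ['romance']):
--         return ["emotional", "intimate", "hopeful"]
--     elif any(word in genre for word in ['comedy', 'humor']):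
--         return ["humorous", "lighthearted", "witty"]
--     elif any(word in genre for word in ['horror']):
--         return ["dark", "eerie", "unsettling"]
--     elif any(word in genre for word in ['sci-fi', 'cyberpunk']):
--         return ["futuristic", "clinical", "philosophical"]
--     elif any(word in genre for word in ['literary']):
--         return ["introspective", "poetic", "contemplative"]
--     else:
--         return []
-- ===== SOURCE B (Python) =====
-- # B: flat keyword->priority map; scan ALL keywords, take the minimum priority
-- # of those present, and index a tones array (no cascade, no early return).
-- _KEYWORD_PRIORITY = {
--     'thriller': 0, 'noir': 0, 'mystery': 0,
--     'fantasy': 1, 'epic': 1,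
--     'romance': 2,
--     'comedy': 3, 'humor': 3,
--     'horror': 4,
--     'sci-fi': 5, 'cyberpunk': 5,
--     'literary': 6,
-- }
--
-- _TONES = [
--     ["dark", "tense", "suspenseful"],
--     ["epic", "adventurous", "mystical"],
--     ["emotional", "intimate", "hopeful"],
--     ["humorous", "lighthearted", "witty"],
--     ["dark", "eerie", "unsettling"],
--     ["futuristic", "clinical", "philosophical"],
--     ["introspective", "poetic", "contemplative"],
-- ]
--
--
-- def _suggest_tone_for_genre(genre: str) -> list:
--     """Suggest narrative tone based on genre (argmin over matched keyword priorities)."""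
--     g = genre.lower()
--     hits = [p for kw, p in _KEYWORD_PRIORITY.items() if kw in g]
--     if not hits:
--         return []
--     return list(_TONES[min(hits)])
-- ===== Notes on version B (the rewrite author's own statement) =====
-- stated objective: alternative
-- what changed: Replaced the first-match if-elif cascade over keyword groups by a full scan of a flat keyword->priority map, taking the minimum priority among all matched keywords and indexing a tones array; correct because the group order in A coincides with ascending priority, so the first matching group is the one of minimum priority.
import Mathlib
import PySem

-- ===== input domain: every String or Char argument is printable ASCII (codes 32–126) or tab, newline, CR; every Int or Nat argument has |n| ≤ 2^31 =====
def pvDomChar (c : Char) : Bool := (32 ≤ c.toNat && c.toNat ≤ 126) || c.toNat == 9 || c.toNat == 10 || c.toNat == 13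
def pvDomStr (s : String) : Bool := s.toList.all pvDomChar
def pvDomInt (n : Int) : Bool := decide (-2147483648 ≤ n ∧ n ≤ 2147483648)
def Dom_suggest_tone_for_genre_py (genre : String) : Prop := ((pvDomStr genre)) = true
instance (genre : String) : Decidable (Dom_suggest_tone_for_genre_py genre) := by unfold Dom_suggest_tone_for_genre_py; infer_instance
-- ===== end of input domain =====

-- B replaces A's if-elif cascade with a full scan over a flat keyword→priority map,
-- taking the minimum matched priority and indexing a tones array (objective: alternative).

-- ===== PORT A =====
def suggest_tone_for_genre_py (genre : String) : List String :=
  let g := PySem.Str.lower genre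
  if ["thriller", "noir", "mystery"].any (fun w => PySem.Str.isIn w g) then
    ["dark", "tense", "suspenseful"]
  else if ["fantasy", "epic"].any (fun w => PySem.Str.isIn w g) then
    ["epic", "adventurous", "mystical"]
  else if ["romance"].any (fun w => PySem.Str.isIn w g) then
    ["emotional", "intimate", "hopeful"]
  else if ["comedy", "humor"].any (fun w => PySem.Str.isIn w g) then
    ["humorous", "lighthearted", "witty"]
  else if ["horror"].any (fun w => PySem.Str.isIn w g) then
    ["dark", "eerie", "unsettling"]
  else if ["sci-fi", "cyberpunk"].any (fun w => PySem.Str.isIn w g) then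
    ["futuristic", "clinical", "philosophical"]
  else if ["literary"].any (fun w => PySem.Str.isIn w g) then
    ["introspective", "poetic", "contemplative"]
  else
    []

-- ===== PORT B =====
def pvKeywordPriority : List (String × Int) :=
  [ ("thriller", 0), ("noir", 0), ("mystery", 0)
  , ("fantasy", 1), ("epic", 1)
  , ("romance", 2)
  , ("comedy", 3), ("humor", 3)
  , ("horror", 4)
  , ("sci-fi", 5), ("cyberpunk", 5)
  , ("literary", 6) ]

def pvTones : List (List String) :=
  [ ["dark", "tense", "suspenseful"]
  , ["epic", "adventurous", "mystical"]
  , ["emotional", "intimate", "hopeful"]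
  , ["humorous", "lighthearted", "witty"]
  , ["dark", "eerie", "unsettling"]
  , ["futuristic", "clinical", "philosophical"]
  , ["introspective", "poetic", "contemplative"] ]

def suggest_tone_for_genre_py_alt (genre : String) : List String :=
  let g := PySem.Str.lower genre
  let hits := pvKeywordPriority.filterMap
    (fun p => if PySem.Str.isIn p.1 g then some p.2 else none)
  match PySem.List.min? hits (fun x => x) with
  | none => []                                   -- 'if not hits: return []'
  | some m => (PySem.List.pyGet? pvTones m).getD []   -- '_TONES[min(hits)]' (index always 0..6)

-- ===== PRECONDITION & SPEC =====
def Spec_suggest_tone_for_genre_py (genre : String) (out : List String) : Prop := out = suggest_tone_for_genre_py_alt genre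
instance (genre : String) (out : List String) : Decidable (Spec_suggest_tone_for_genre_py genre out) := by unfold Spec_suggest_tone_for_genre_py; infer_instance

-- ===== CLAIM (what is proved, stated in full; the proofs are below) =====
def Claim_equal_suggest_tone_for_genre_py : Prop := ∀ (genre : String), Dom_suggest_tone_for_genre_py genre → Spec_suggest_tone_for_genre_py genre (suggest_tone_for_genre_py genre)

-- ===== LEMMAS AND PROOFS =====

-- ===== VERDICT (by name: the statement is the Claim_ definition above) =====
set_option maxHeartbeats 4000000 in
theorem suggest_tone_for_genre_py_spec : Claim_equal_suggest_tone_for_genre_py := by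
  intro genre _
  unfold Spec_suggest_tone_for_genre_py suggest_tone_for_genre_py suggest_tone_for_genre_py_alt pvKeywordPriority pvTones
  simp only [List.any_cons, List.any_nil, List.filterMap, Bool.or_false]
  generalize PySem.Str.isIn "thriller" (PySem.Str.lower genre) = b1
  generalize PySem.Str.isIn "noir" (PySem.Str.lower genre) = b2
  generalize PySem.Str.isIn "mystery" (PySem.Str.lower genre) = b3
  generalize PySem.Str.isIn "fantasy" (PySem.Str.lower genre) = b4
  generalize PySem.Str.isIn "epic" (PySem.Str.lower genre) = b5
  generalize PySem.Str.isIn "romance" (PySem.Str.lower genre) = b6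
  generalize PySem.Str.isIn "comedy" (PySem.Str.lower genre) = b7
  generalize PySem.Str.isIn "humor" (PySem.Str.lower genre) = b8
  generalize PySem.Str.isIn "horror" (PySem.Str.lower genre) = b9
  generalize PySem.Str.isIn "sci-fi" (PySem.Str.lower genre) = b10
  generalize PySem.Str.isIn "cyberpunk" (PySem.Str.lower genre) = b11
  generalize PySem.Str.isIn "literary" (PySem.Str.lower genre) = b12
  revert b1 b2 b3 b4 b5 b6 b7 b8 b9 b10 b11 b12
  decide
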